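-- pv_equiv track=rewrite | github.com/posl/comment_recommendation | script/split_gen/5_time/ja/115_D/3.py | burger
-- ===== SOURCE A (Python) =====
-- def burger(n, x):
--     if n == 0:
--         return 1
--     p = 2**(n+2)-3
--     if x == 1:
--         return 0
--     elif x <= p:
--         return burger(n-1, x-1)
--     elif x == p+1:
--         return 1+burger(n-1, x-1)
--     elif x <= p*2:
--         return 1+burger(n-1, x-1-p)+1
--     else:
--         return 1+burger(n-1, x-1-p*2)+1+burger(n-1, x-1-p*2)
-- ===== SOURCE B (Python) =====
-- def burger(n, x):
--     # Iterative O(n) descent with (accumulator, multiplier) instead of tree recursion;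
--     # layer-count comparisons use shifts so the huge power 2**(n+2) is only built when x is that large.
--     acc, mult = 0, 1
--     while n > 0:
--         if x == 1:
--             return acc
--         if x <= 0 or (x + 2) >> (n + 2) == 0:      # x <= 2**(n+2) - 3
--             x -= 1
--         elif x == (1 << (n + 2)) - 2:              # x == p + 1
--             acc += mult
--             x -= 1
--         elif (x + 5) >> (n + 3) == 0:              # x <= 2*p
--             acc += 2 * mult
--             x -= 1 + ((1 << (n + 2)) - 3)
--         else:
--             acc += 2 * mult
--             mult *= 2
--             x -= 1 + 2 * ((1 << (n + 2)) - 3)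
--         n -= 1
--     return acc + mult
-- ===== Notes on version B (the rewrite author's own statement) =====
-- stated objective: faster
-- what changed: Replaced A's tree recursion (whose last branch recomputes the same subcall twice, giving exponential blowup) by an iterative single descent that carries an accumulator and a multiplier, one loop iteration per level.
-- outside the precondition, e.g. on burger(-2, 1): A returns 0, B returns 1
import Mathlib
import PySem

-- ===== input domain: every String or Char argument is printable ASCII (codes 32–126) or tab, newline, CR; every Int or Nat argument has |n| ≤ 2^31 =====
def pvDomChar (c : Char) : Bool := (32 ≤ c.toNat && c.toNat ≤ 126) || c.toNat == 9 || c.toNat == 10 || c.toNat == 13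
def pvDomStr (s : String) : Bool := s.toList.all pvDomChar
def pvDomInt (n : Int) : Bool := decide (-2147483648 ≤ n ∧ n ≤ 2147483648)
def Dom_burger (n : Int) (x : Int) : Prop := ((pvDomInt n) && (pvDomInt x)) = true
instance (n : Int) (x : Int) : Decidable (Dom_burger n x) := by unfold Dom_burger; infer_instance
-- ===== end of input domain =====

-- B replaces A's tree recursion by an iterative descent carrying an accumulator and a multiplier,
-- comparing x against the level sizes with shifts instead of materializing the power at every level.

-- ===== PORT A =====
-- A recurses on n down to 0; fuel = n.toNat (for n < 0 Python never reaches the base case and raises RecursionError — excluded by Pre_).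
def burgerGo : Nat → Int → Int
  | 0, _ => 1
  | m + 1, x =>
    let p : Int := 2 ^ (m + 3) - 3
    if x = 1 then 0
    else if x ≤ p then burgerGo m (x - 1)
    else if x = p + 1 then 1 + burgerGo m (x - 1)
    else if x ≤ p * 2 then 1 + burgerGo m (x - 1 - p) + 1
    else 1 + burgerGo m (x - 1 - p * 2) + 1 + burgerGo m (x - 1 - p * 2)

def burger (n : Int) (x : Int) : Int := burgerGo n.toNat x

-- ===== PORT B =====
-- Python's 'a >> k' is floor division by 2^k: ported as PySem.Int.floordiv a (2^k).
def burgerAltGo : Nat → Int → Int → Int → Int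
  | 0, _, acc, mult => acc + mult
  | m + 1, x, acc, mult =>
    if x = 1 then acc
    else if x ≤ 0 ∨ PySem.Int.floordiv (x + 2) (2 ^ (m + 3)) = 0 then
      burgerAltGo m (x - 1) acc mult
    else if x = 2 ^ (m + 3) - 2 then
      burgerAltGo m (x - 1) (acc + mult) mult
    else if PySem.Int.floordiv (x + 5) (2 ^ (m + 4)) = 0 then
      burgerAltGo m (x - 1 - (2 ^ (m + 3) - 3)) (acc + 2 * mult) mult
    else
      burgerAltGo m (x - 1 - 2 * (2 ^ (m + 3) - 3)) (acc + 2 * mult) (2 * mult)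

def burger_alt (n : Int) (x : Int) : Int := burgerAltGo n.toNat x 0 1

-- ===== PRECONDITION & SPEC =====
-- Pre_ excludes negative levels n < 0, outside the function's natural domain: there Python A recurses
-- forever (RecursionError) except when x == 1, where its immediate 0 is an accident of the branch order
-- that B's loop does not mirror.
def Pre_burger (n : Int) (_x : Int) : Prop := 0 ≤ n
instance (n : Int) (x : Int) : Decidable (Pre_burger n x) := by unfold Pre_burger; infer_instance
def pvWitness_burger : Int × Int := (3, 10)

def Spec_burger (n : Int) (x : Int) (out : Int) : Prop := out = burger_alt n x
instance (n : Int) (x : Int) (out : Int) : Decidable (Spec_burger n x out) := by unfold Spec_burger; infer_instance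

-- ===== CLAIM (what is proved, stated in full; the proofs are below) =====
def Claim_equal_burger : Prop := ∀ (n : Int) (x : Int), Dom_burger n x → Pre_burger n x → Spec_burger n x (burger n x)

-- ===== LEMMAS AND PROOFS =====
theorem fdiv_zero_iff (a b : Int) (hb : 0 < b) :
    PySem.Int.floordiv a b = 0 ↔ 0 ≤ a ∧ a < b := by
  rw [PySem.Int.floordiv_eq_iff_of_pos hb]
  constructor <;> intro h <;> constructor <;> omega

theorem two_pow_ge (m : Nat) : (8 : Int) ≤ 2 ^ (m + 3) := by
  calc (8 : Int) = 2 ^ 3 := by norm_num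
    _ ≤ 2 ^ (m + 3) := by
      apply pow_le_pow_right₀ (by norm_num) (by omega)

theorem burgerAltGo_eq (m : Nat) : ∀ (x acc mult : Int),
    burgerAltGo m x acc mult = acc + mult * burgerGo m x := by
  induction m with
  | zero => intro x acc mult; simp [burgerAltGo, burgerGo]
  | succ m ih =>
    intro x acc mult
    have hpow : (8 : Int) ≤ 2 ^ (m + 3) := two_pow_ge m
    have hpow4 : (2 : Int) ^ (m + 4) = 2 * 2 ^ (m + 3) := by ring
    have h1 : (x ≤ 0 ∨ PySem.Int.floordiv (x + 2) (2 ^ (m + 3)) = 0) ↔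
        x ≤ 2 ^ (m + 3) - 3 := by
      rw [fdiv_zero_iff _ _ (by omega)]
      omega
    have h3 : (PySem.Int.floordiv (x + 5) (2 ^ (m + 4)) = 0) ↔
        (0 ≤ x + 5 ∧ x ≤ (2 ^ (m + 3) - 3) * 2) := by
      rw [fdiv_zero_iff _ _ (by rw [hpow4]; omega)]
      omega
    simp only [burgerAltGo, burgerGo, h1, h3]
    clear h1 h3 hpow4
    generalize hP : (2 : Int) ^ (m + 3) = P at hpow ⊢
    clear hP
    split_ifs <;> (try simp only [ih]) <;> first
      | ring1
      | omega
      | (exfalso; omega)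
      | (ring_nf)
-- matched branch pairs close by ring1/ring_nf after ih; mismatched pairs have contradictory hypotheses, exfalso+omega closes them.

-- ===== VERDICT (by name: the statement is the Claim_ definition above) =====
theorem burger_spec : Claim_equal_burger := by
  intro n x _ _
  unfold Spec_burger burger burger_alt
  rw [burgerAltGo_eq]
  ring
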